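-- pv_equiv track=rewrite | github.com/lainn9527/agent-story | story_core/debug_helpers.py | _pick_latest_debug_directive
-- ===== SOURCE A (Python) =====
-- def _pick_latest_debug_directive(directives: object) -> dict | None:
--     if not isinstance(directives, list):
--         return None
--     for item in reversed(directives):
--         if not isinstance(item, dict):
--             continue
--         instruction = str(item.get("instruction", "")).strip()
--         if not instruction:
--             continue
--         return {"instruction": instruction}
--     return None
-- ===== SOURCE B (Python) =====
-- def _pick_latest_debug_directive(directives: object) -> dict | None:
--     if not isinstance(directives, list):
--         return None
--     collected = [s for s in (str(item.get("instruction", "")).strip()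
--                              for item in directives if isinstance(item, dict)) if s]
--     return {"instruction": collected[-1]} if collected else None
-- ===== Notes on version B (the rewrite author's own statement) =====
-- stated objective: simpler
-- what changed: Replaces the reversed early-exit scan with a single forward comprehension collecting all stripped non-empty instructions, then returns the last collected one (or None).
import Mathlib
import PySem

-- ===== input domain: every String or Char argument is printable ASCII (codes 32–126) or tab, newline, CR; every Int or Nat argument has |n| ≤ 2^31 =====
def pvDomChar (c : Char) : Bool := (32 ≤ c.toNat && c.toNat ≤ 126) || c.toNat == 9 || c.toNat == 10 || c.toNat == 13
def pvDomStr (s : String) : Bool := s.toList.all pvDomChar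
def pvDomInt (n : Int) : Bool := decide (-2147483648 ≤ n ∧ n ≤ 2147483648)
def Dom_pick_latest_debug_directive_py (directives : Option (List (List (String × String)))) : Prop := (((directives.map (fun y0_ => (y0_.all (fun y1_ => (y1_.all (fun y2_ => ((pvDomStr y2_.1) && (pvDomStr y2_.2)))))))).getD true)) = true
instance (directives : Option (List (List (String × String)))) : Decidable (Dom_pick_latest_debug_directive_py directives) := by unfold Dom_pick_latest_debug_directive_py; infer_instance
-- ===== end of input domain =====

-- ===== PORT A =====
-- B collects forward and takes the last; A scans in reverse and returns early. Same value, different decomposition.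
-- Under the type convention every item is a dict and values are strings, so the isinstance guards and str() are identities.
def pickRevA : List (List (String × String)) → Option (List (String × String))
  | [] => none
  | item :: rest =>
    let instruction := PySem.Str.strip (PySem.Dict.getD (PySem.Dict.mk item) "instruction" "")
    if instruction = "" then pickRevA rest
    else some [("instruction", instruction)]

def pick_latest_debug_directive_py (directives : Option (List (List (String × String)))) : Option (List (String × String)) :=
  match directives with
  | none => none                      -- 'not isinstance(directives, list)'
  | some xs => pickRevA xs.reverse    -- 'for item in reversed(directives)'

-- ===== PORT B =====
def pick_latest_debug_directive_py_alt (directives : Option (List (List (String × String)))) : Option (List (String × String)) :=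
  match directives with
  | none => none
  | some xs =>
    let collected :=
      (xs.map (fun item => PySem.Str.strip (PySem.Dict.getD (PySem.Dict.mk item) "instruction" ""))).filter
        (fun s => s != "")
    match collected.getLast? with
    | some s => some [("instruction", s)]
    | none => none

-- ===== PRECONDITION & SPEC =====
def Spec_pick_latest_debug_directive_py (directives : Option (List (List (String × String)))) (out : Option (List (String × String))) : Prop := out = pick_latest_debug_directive_py_alt directives
instance (directives : Option (List (List (String × String)))) (out : Option (List (String × String))) : Decidable (Spec_pick_latest_debug_directive_py directives out) := by unfold Spec_pick_latest_debug_directive_py; infer_instance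

-- ===== CLAIM (what is proved, stated in full; the proofs are below) =====
def Claim_equal_pick_latest_debug_directive_py : Prop := ∀ (directives : Option (List (List (String × String)))), Dom_pick_latest_debug_directive_py directives → Spec_pick_latest_debug_directive_py directives (pick_latest_debug_directive_py directives)

-- ===== LEMMAS AND PROOFS =====
-- A's reverse scan = head? of the filtered map of the scanned list.
theorem pickRevA_eq_head (ys : List (List (String × String))) :
    pickRevA ys =
      ((ys.map (fun item => PySem.Str.strip (PySem.Dict.getD (PySem.Dict.mk item) "instruction" ""))).filter
        (fun s => s != "")).head?.map (fun s => [("instruction", s)]) := by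
  induction ys with
  | nil => rfl
  | cons item rest ih =>
    by_cases h : PySem.Str.strip (PySem.Dict.getD (PySem.Dict.mk item) "instruction" "") = ""
    · simp [pickRevA, h, ih]
    · simp [pickRevA, h]

-- ===== VERDICT (by name: the statement is the Claim_ definition above) =====
theorem pick_latest_debug_directive_py_spec : Claim_equal_pick_latest_debug_directive_py := by
  intro directives _
  unfold Spec_pick_latest_debug_directive_py
  match directives with
  | none => rfl
  | some xs =>
    show pickRevA xs.reverse = _
    rw [pickRevA_eq_head]
    simp only [List.map_reverse, List.filter_reverse, List.head?_reverse,
      pick_latest_debug_directive_py_alt]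
    cases h : ((xs.map (fun item => PySem.Str.strip (PySem.Dict.getD (PySem.Dict.mk item) "instruction" ""))).filter (fun s => s != "")).getLast? <;> simp
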